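-- pv_equiv track=rewrite | github.com/ArianGohari/rosalind_bioinformatics_stronghold | sign.py | sign_rec
-- ===== SOURCE A (Python) =====
-- def sign_rec(perm, elements, result, n):
--     if len(perm) < n:
--         for element in elements:
--             if not perm.count(str(0 - element)):
--                 remaining_elements = elements.copy()
--                 remaining_elements.remove(element)
--                 result = sign_rec(perm.copy() + [str(element)], remaining_elements, result, n)
--
--     elif len(perm) == n:
--         result.append(perm)
--
--     return result
-- ===== SOURCE B (Python) =====
-- def sign_rec(perm, elements, result, n):
--     # Iterative DFS with an explicit stack instead of A's recursion; same return
--     # value, but unlike A it does not mutate `result` in place.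
--     out = list(result)
--     stack = [(list(perm), list(elements))]
--     while stack:
--         p, es = stack.pop()
--         if len(p) == n:
--             out.append(p)
--         elif len(p) < n:
--             for e in reversed(es):
--                 if str(0 - e) not in p:
--                     rem = list(es)
--                     rem.remove(e)
--                     stack.append((p + [str(e)], rem))
--     return out
-- ===== Notes on version B (the rewrite author's own statement) =====
-- stated objective: alternative
-- what changed: A's hand-written backtracking recursion (threading the result accumulator through recursive calls) is replaced by an iterative depth-first search over an explicit stack of (partial permutation, remaining elements) frames, popped in LIFO order with children pushed reversed to preserve A's exact output order; B also copies `result` instead of mutating it in place.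
import Mathlib
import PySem

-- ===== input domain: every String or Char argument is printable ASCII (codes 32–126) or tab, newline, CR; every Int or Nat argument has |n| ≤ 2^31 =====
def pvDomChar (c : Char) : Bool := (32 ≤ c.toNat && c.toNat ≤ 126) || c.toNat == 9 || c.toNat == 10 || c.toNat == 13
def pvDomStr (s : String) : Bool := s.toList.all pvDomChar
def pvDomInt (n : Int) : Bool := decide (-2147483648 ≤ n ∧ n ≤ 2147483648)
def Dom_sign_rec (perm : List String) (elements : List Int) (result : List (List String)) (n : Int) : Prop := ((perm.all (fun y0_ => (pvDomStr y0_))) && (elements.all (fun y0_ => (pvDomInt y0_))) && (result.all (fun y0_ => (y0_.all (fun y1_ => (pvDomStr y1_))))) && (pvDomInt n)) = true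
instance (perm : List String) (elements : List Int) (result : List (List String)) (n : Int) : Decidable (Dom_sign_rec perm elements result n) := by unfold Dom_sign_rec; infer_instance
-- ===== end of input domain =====

-- B replaces A's backtracking recursion by an iterative DFS over an explicit stack
-- (same return value on every input; note A mutates `result` in place, B does not —
-- the equivalence proved here is about the return value).

-- ===== PORT A =====
-- Literal port of A's recursion.  The outer `if len(perm) < n` branch runs the
-- `for element in elements` loop (signLoop iterates `todo`, starting at `elements`,
-- while `elements` itself stays fixed, exactly as in Python where the loop list is
-- never mutated); `remaining_elements = elements.copy(); remaining_elements.remove(element)`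
-- is PySem.List.remove? elements e (its `none` branch is unreachable: e is drawn from
-- elements, so Python's ValueError can never fire).
mutual
def sign_rec (perm : List String) (elements : List Int) (result : List (List String)) (n : Int) : List (List String) :=
  if (perm.length : Int) < n then
    signLoop perm elements elements result n
  else if (perm.length : Int) = n then
    result ++ [perm]
  else
    result
termination_by ((elements.length + 1, 0) : Nat × Nat)
decreasing_by
  exact Prod.Lex.left _ _ (Nat.lt_succ_self _)

def signLoop (perm : List String) (todo : List Int) (elements : List Int) (result : List (List String)) (n : Int) : List (List String) :=
  match todo with
  | [] => result
  | e :: rest =>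
    if perm.count (PySem.Int.toStr (0 - e)) = 0 then
      match h : PySem.List.remove? elements e with
      | some rem => signLoop perm rest elements (sign_rec (perm ++ [PySem.Int.toStr e]) rem result n) n
      | none => signLoop perm rest elements result n   -- unreachable (e ∈ elements always)
    else
      signLoop perm rest elements result n
termination_by ((elements.length, todo.length) : Nat × Nat)
decreasing_by
  · have hlen : rem.length + 1 = elements.length := by
      have hmem : e ∈ elements := by
        by_contra hne
        rw [(PySem.List.remove?_eq_none_iff elements e).mpr hne] at h
        simp at h
      rw [PySem.List.remove?_eq_some_erase elements e hmem] at h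
      have h2 := List.length_erase_of_mem hmem
      have h4 : 0 < elements.length := List.length_pos_of_mem hmem
      injection h with h3
      rw [← h3]
      omega
    rw [hlen]
    exact Prod.Lex.right _ (by simp)
  · exact Prod.Lex.right _ (by simp)
  · exact Prod.Lex.right _ (by simp)
  · exact Prod.Lex.right _ (by simp)
end

-- ===== PORT B =====
-- the frames pushed for one popped frame (the body of B's `for e in reversed(es)`
-- loop: pushing the passing children in reversed order and then popping from the
-- top of the stack consumes them left to right, so this list is in `es` order);
-- `rem = list(es); rem.remove(e)` is (PySem.List.remove? es e).getD es — the getD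
-- default is unreachable (e ∈ es there).
def pvChildren (p : List String) (es : List Int) : List (List String × List Int) :=
  (es.filter (fun e => !(p.contains (PySem.Int.toStr (0 - e))))).map
    (fun e => (p ++ [PySem.Int.toStr e], (PySem.List.remove? es e).getD es))

-- measure for B's stack loop: Σ over frames of (|es|+1)!  (used by decreasing_by)
def pvMu (stack : List (List String × List Int)) : Nat :=
  (stack.map (fun fr => Nat.factorial (fr.2.length + 1))).sum

theorem pvMu_children_lt (p : List String) (es : List Int) (rest : List (List String × List Int)) :
    pvMu (pvChildren p es ++ rest) < pvMu ((p, es) :: rest) := by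
  have hsum : ∀ l : List Int, (∀ x ∈ l, x ∈ es) →
      pvMu (l.map (fun e => (p ++ [PySem.Int.toStr e], (PySem.List.remove? es e).getD es)))
        = l.length * Nat.factorial es.length := by
    intro l
    induction l with
    | nil => intro _; simp [pvMu]
    | cons x xs ih =>
      intro hmem
      have hx : x ∈ es := hmem x (List.mem_cons_self ..)
      have hrec := ih (fun y hy => hmem y (List.mem_cons_of_mem _ hy))
      have hr : (PySem.List.remove? es x).getD es = es.erase x := by
        rw [PySem.List.remove?_eq_some_erase es x hx]; rfl
      have hl : (es.erase x).length + 1 = es.length := by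
        have h1 := List.length_erase_of_mem hx
        have h2 := List.length_pos_of_mem hx
        omega
      simp only [List.map_cons, pvMu, List.sum_cons] at hrec ⊢
      rw [hr, hl, hrec]
      simp [List.length_cons]; ring
  have hfilter : ∀ x ∈ es.filter (fun e => !(p.contains (PySem.Int.toStr (0 - e)))), x ∈ es := by
    intro x hx; exact List.mem_of_mem_filter hx
  have h1 := hsum _ hfilter
  have h2 : (es.filter (fun e => !(p.contains (PySem.Int.toStr (0 - e))))).length ≤ es.length :=
    List.length_filter_le _ _
  have hmu_append : pvMu (pvChildren p es ++ rest) = pvMu (pvChildren p es) + pvMu rest := by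
    simp [pvMu]
  have hcons : pvMu ((p, es) :: rest) = Nat.factorial (es.length + 1) + pvMu rest := by
    simp [pvMu]
  rw [hmu_append, hcons]
  unfold pvChildren
  rw [h1]
  have hlt : es.length * Nat.factorial es.length < Nat.factorial (es.length + 1) := by
    rw [Nat.factorial_succ]
    have := Nat.factorial_pos es.length
    nlinarith
  have hle : (es.filter (fun e => !(p.contains (PySem.Int.toStr (0 - e))))).length * Nat.factorial es.length
        ≤ es.length * Nat.factorial es.length := Nat.mul_le_mul_right _ h2
  omega

-- Literal port of B's while-loop over the explicit stack (head of the list = top of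
-- the Python stack).
def stackRun (stack : List (List String × List Int)) (out : List (List String)) (n : Int) : List (List String) :=
  match stack with
  | [] => out
  | (p, es) :: rest =>
    if (p.length : Int) = n then
      stackRun rest (out ++ [p]) n
    else if (p.length : Int) < n then
      stackRun (pvChildren p es ++ rest) out n
    else
      stackRun rest out n
termination_by pvMu stack
decreasing_by
  · simp [pvMu]; positivity
  · exact pvMu_children_lt p es rest
  · simp [pvMu]; positivity

def sign_rec_alt (perm : List String) (elements : List Int) (result : List (List String)) (n : Int) : List (List String) :=
  stackRun [(perm, elements)] result n

-- ===== PRECONDITION & SPEC =====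
def Spec_sign_rec (perm : List String) (elements : List Int) (result : List (List String)) (n : Int) (out : List (List String)) : Prop := out = sign_rec_alt perm elements result n
instance (perm : List String) (elements : List Int) (result : List (List String)) (n : Int) (out : List (List String)) : Decidable (Spec_sign_rec perm elements result n out) := by unfold Spec_sign_rec; infer_instance

-- ===== CLAIM (what is proved, stated in full; the proofs are below) =====
def Claim_equal_sign_rec : Prop := ∀ (perm : List String) (elements : List Int) (result : List (List String)) (n : Int), Dom_sign_rec perm elements result n → Spec_sign_rec perm elements result n (sign_rec perm elements result n)

-- ===== LEMMAS AND PROOFS =====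

-- A's inner loop equals a fold of sign_rec over B's children list.
theorem signLoop_eq_foldl (perm : List String) (n : Int) :
    ∀ (todo es : List Int) (out : List (List String)), (∀ x ∈ todo, x ∈ es) →
      signLoop perm todo es out n
        = ((todo.filter (fun e => !(perm.contains (PySem.Int.toStr (0 - e))))).map
            (fun e => (perm ++ [PySem.Int.toStr e], (PySem.List.remove? es e).getD es))).foldl
            (fun acc fr => sign_rec fr.1 fr.2 acc n) out := by
  intro todo
  induction todo with
  | nil => intro es out _; simp [signLoop]
  | cons e rest ih =>
    intro es out hmem
    have he : e ∈ es := hmem e (List.mem_cons_self ..)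
    have hrest : ∀ x ∈ rest, x ∈ es := fun x hx => hmem x (List.mem_cons_of_mem _ hx)
    have hcond : (perm.count (PySem.Int.toStr (0 - e)) = 0) ↔
        (!(perm.contains (PySem.Int.toStr (0 - e)))) = true := by
      simp [List.count_eq_zero]
    have hsome := PySem.List.remove?_eq_some_erase es e he
    by_cases hc : perm.count (PySem.Int.toStr (0 - e)) = 0
    · have hb : (!(perm.contains (PySem.Int.toStr (0 - e)))) = true := hcond.mp hc
      have hfc : (e :: rest).filter (fun e => !(perm.contains (PySem.Int.toStr (0 - e))))
          = e :: rest.filter (fun e => !(perm.contains (PySem.Int.toStr (0 - e)))) := by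
        rw [List.filter_cons, if_pos hb]
      rw [signLoop, if_pos hc, hfc, List.map_cons, List.foldl_cons]
      split
      · next rem hrem =>
          rw [hsome] at hrem
          injection hrem with hrem'
          rw [← hrem', ih es _ hrest, hsome]
          rfl
      · next hrem =>
          rw [hsome] at hrem
          simp at hrem
    · have hb : (!(perm.contains (PySem.Int.toStr (0 - e)))) = false := by
        cases hb2 : (!(perm.contains (PySem.Int.toStr (0 - e)))) with
        | true => exact absurd (hcond.mpr hb2) hc
        | false => rfl
      have hfc : (e :: rest).filter (fun e => !(perm.contains (PySem.Int.toStr (0 - e))))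
          = rest.filter (fun e => !(perm.contains (PySem.Int.toStr (0 - e)))) := by
        rw [List.filter_cons, if_neg (by rw [hb]; simp)]
      rw [signLoop, if_neg hc, hfc]
      exact ih es out hrest

-- B's stack loop equals folding A over the stack frames.
theorem stackRun_eq_foldl (n : Int) (stack : List (List String × List Int)) (out : List (List String)) :
      stackRun stack out n = stack.foldl (fun acc fr => sign_rec fr.1 fr.2 acc n) out := by
  induction stack, out using stackRun.induct n with
  | case1 out => simp [stackRun]
  | case2 out p es rest heq ih =>
    rw [stackRun]
    simp only [heq, if_pos]
    rw [ih, List.foldl_cons]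
    have hA : sign_rec p es out n = out ++ [p] := by
      have hnl : ¬ ((p.length : Int) < n) := by omega
      rw [sign_rec, if_neg hnl, if_pos heq]
    rw [hA]
  | case3 out p es rest hne hlt ih =>
    rw [stackRun]
    rw [if_neg hne, if_pos hlt]
    rw [ih, List.foldl_append, List.foldl_cons]
    have hA : sign_rec p es out n
        = (pvChildren p es).foldl (fun acc fr => sign_rec fr.1 fr.2 acc n) out := by
      rw [sign_rec, if_pos hlt]
      exact signLoop_eq_foldl p n es es out (fun x hx => hx)
    rw [hA]
  | case4 out p es rest hne hnlt ih =>
    rw [stackRun]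
    rw [if_neg hne, if_neg hnlt]
    rw [ih, List.foldl_cons]
    have hA : sign_rec p es out n = out := by
      rw [sign_rec, if_neg hnlt, if_neg hne]
    rw [hA]

-- ===== VERDICT (by name: the statement is the Claim_ definition above) =====
theorem sign_rec_spec : Claim_equal_sign_rec := by
  intro perm elements result n _
  unfold Spec_sign_rec sign_rec_alt
  rw [stackRun_eq_foldl]
  simp [List.foldl]
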